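-- pv_equiv track=rewrite | github.com/xinranhe/MHGU | equipment_search.py | summarize_gems
-- ===== SOURCE A (Python) =====
-- from collections import defaultdict
--
-- def summarize_gems(gems):
--     count = defaultdict(int)
--     for gem in gems:
--         count[gem] += 1
--     results = []
--     for gem in sorted(count.keys()):
--         results.append("%s X %d" % (gem, count[gem]))
--     return ", ".join(results)
-- ===== SOURCE B (Python) =====
-- def summarize_gems(gems):
--     # Sort everything, then scan adjacent runs of equal gems.
--     s = sorted(gems)
--     parts = []
--     i = 0
--     n = len(s)
--     while i < n:
--         j = i
--         while j < n and s[j] == s[i]: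
--             j += 1
--         parts.append("%s X %d" % (s[i], j - i))
--         i = j
--     return ", ".join(parts)
-- ===== Notes on version B (the rewrite author's own statement) =====
-- stated objective: alternative
-- what changed: Replaces A's dict-counting pass followed by sorting the distinct keys with sorting the whole list once and scanning adjacent runs of equal gems, emitting one piece per run.
import Mathlib
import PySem

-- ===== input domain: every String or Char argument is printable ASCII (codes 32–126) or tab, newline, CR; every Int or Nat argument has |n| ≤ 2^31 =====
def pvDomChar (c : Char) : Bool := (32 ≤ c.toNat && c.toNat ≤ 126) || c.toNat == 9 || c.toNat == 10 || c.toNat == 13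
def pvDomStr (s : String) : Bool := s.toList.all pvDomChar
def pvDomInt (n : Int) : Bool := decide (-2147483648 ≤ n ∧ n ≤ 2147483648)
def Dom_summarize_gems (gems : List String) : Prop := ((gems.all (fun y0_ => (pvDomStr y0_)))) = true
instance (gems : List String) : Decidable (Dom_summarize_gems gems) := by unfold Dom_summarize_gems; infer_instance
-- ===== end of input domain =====

-- B replaces A's dict-counting pass + sort-of-keys by sort-the-whole-list-then-scan-adjacent-runs
-- (objective: alternative, same result; no speed claim).

-- ===== PORT A =====
def summarize_gems (gems : List String) : String :=
  -- count = defaultdict(int); for gem in gems: count[gem] += 1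
  let count := gems.foldl (fun d g => d.insert g (d.getD g 0 + 1)) PySem.Dict.empty
  -- results = []; for gem in sorted(count.keys()): results.append("%s X %d" % (gem, count[gem]))
  let results := (PySem.List.sorted count.keys (fun x => x) false).foldl
      (fun acc g => acc ++ [g ++ " X " ++ PySem.Int.toStr (count.getD g 0)]) []
  PySem.Str.join ", " results

-- ===== PORT B =====
-- inner while loop of Source B: length of the leading run of x and the remainder after it
def spanEq (x : String) : List String → Nat × List String
  | [] => (0, [])
  | y :: ys => if y = x then ((spanEq x ys).1 + 1, (spanEq x ys).2) else (0, y :: ys)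

theorem spanEq_snd_length_le (x : String) (xs : List String) :
    (spanEq x xs).2.length ≤ xs.length := by
  induction xs with
  | nil => simp [spanEq]
  | cons y ys ih =>
    by_cases h : y = x
    · simp [spanEq, h]; omega
    · simp [spanEq, h]

-- outer while loop of Source B: one formatted piece per run of the (sorted) list
def runs : List String → List String
  | [] => []
  | x :: xs =>
      (x ++ " X " ++ PySem.Int.toStr ((spanEq x xs).1 + 1 : Nat)) :: runs (spanEq x xs).2
  termination_by l => l.length
  decreasing_by exact Nat.lt_succ_of_le (spanEq_snd_length_le x xs)

def summarize_gems_alt (gems : List String) : String :=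
  PySem.Str.join ", " (runs (PySem.List.sorted gems (fun x => x) false))

-- ===== PRECONDITION & SPEC =====
def Spec_summarize_gems (gems : List String) (out : String) : Prop := out = summarize_gems_alt gems
instance (gems : List String) (out : String) : Decidable (Spec_summarize_gems gems out) := by unfold Spec_summarize_gems; infer_instance

-- ===== CLAIM (what is proved, stated in full; the proofs are below) =====
def Claim_equal_summarize_gems : Prop := ∀ (gems : List String), Dom_summarize_gems gems → Spec_summarize_gems gems (summarize_gems gems)

-- ===== LEMMAS AND PROOFS =====

-- the leading run: xs splits as (all-x prefix of length (spanEq x xs).1) ++ remainder, whose head is not x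
theorem spanEq_decomp (x : String) (xs : List String) :
    ∃ t, xs = t ++ (spanEq x xs).2 ∧ (∀ y ∈ t, y = x) ∧ t.length = (spanEq x xs).1 ∧
      (∀ z zs, (spanEq x xs).2 = z :: zs → z ≠ x) := by
  induction xs with
  | nil => exact ⟨[], by simp [spanEq]⟩
  | cons y ys ih =>
    by_cases h : y = x
    · obtain ⟨t, h1, h2, h3, h4⟩ := ih
      subst h
      exact ⟨y :: t, by simpa [spanEq] using h1, by simpa using h2,
        by simpa [spanEq] using h3, by simpa [spanEq] using h4⟩
    · refine ⟨[], by simp [spanEq, h], by simp, by simp [spanEq, h], ?_⟩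
      intro z zs hz
      simp [spanEq, h] at hz
      obtain ⟨rfl, rfl⟩ := hz
      exact h

-- ofList of a leading run: collapses to one x in front
theorem ofList_run (x : String) (t rest : List String) (ht : ∀ y ∈ t, y = x) (hx : x ∉ rest) :
    PySem.Set.ofList (x :: (t ++ rest)) = x :: PySem.Set.ofList rest := by
  rw [PySem.Set.ofList_cons]
  congr 1
  induction t with
  | nil =>
    simp only [PySem.Set.discard, List.nil_append]
    apply List.filter_eq_self.mpr
    intro a ha
    have : a ∈ rest := (PySem.Set.mem_ofList rest a).mp ha
    simp only [Bool.not_eq_eq_eq_not, Bool.not_true, beq_eq_false_iff_ne, ne_eq]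
    rintro rfl; exact hx this
  | cons y t' ih =>
    have hy : y = x := ht y (by simp)
    subst hy
    rw [List.cons_append, PySem.Set.ofList_cons]
    have ih' := ih (fun z hz => ht z (by simp [hz]))
    simp only [PySem.Set.discard] at ih' ⊢
    rw [List.filter_cons_of_neg (by simp), List.filter_filter]
    simpa using ih'

-- on a ≤-sorted list, runs reproduces each distinct gem once, with its multiplicity
theorem runs_sorted (l : List String) (h : l.Pairwise (· ≤ ·)) :
    runs l = (PySem.Set.ofList l).map
      (fun g => g ++ " X " ++ PySem.Int.toStr (l.count g : Nat)) := by
  induction hl : l.length using Nat.strong_induction_on generalizing l with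
  | _ n ih =>
  match l with
  | [] => simp [runs, PySem.Set.ofList_nil]
  | x :: xs =>
    obtain ⟨t, h1, h2, h3, h4⟩ := spanEq_decomp x xs
    set rest := (spanEq x xs).2 with hrest
    -- x is not in rest: sortedness forces all later copies of x into the leading run
    have hxrest : x ∉ rest := by
      rcases hr : rest with _ | ⟨z, zs⟩
      · simp
      · have hzx : z ≠ x := h4 z zs hr
        have hxz : x ≤ z :=
          List.rel_of_pairwise_cons h (show z ∈ xs by rw [h1, hr]; simp)
        have hzs : ∀ w ∈ zs, z ≤ w := by
          intro w hw
          have hxs : xs.Pairwise (· ≤ ·) := h.of_cons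
          have hsub : (z :: zs).Sublist xs := by
            rw [h1, hr]; exact (List.sublist_append_right t _)
          exact List.rel_of_pairwise_cons (hxs.sublist hsub) hw
        intro hmem
        rcases List.mem_cons.mp hmem with hmem | hmem
        · exact hzx hmem.symm
        · have hzw : z ≤ x := hzs x hmem
          exact hzx (le_antisymm hzw hxz)
    have hrest_pw : rest.Pairwise (· ≤ ·) := by
      have hsub : rest.Sublist xs := by rw [h1]; exact List.sublist_append_right t _
      exact (h.of_cons).sublist hsub
    have hlt : rest.length < n := by
      rw [← hl, h1]
      simp only [List.length_cons, List.length_append]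
      omega
    have ihr := ih rest.length hlt rest hrest_pw rfl
    have hcount_x : (x :: xs).count x = (spanEq x xs).1 + 1 := by
      have ht0 : t.count x = t.length := List.count_eq_length.mpr (fun y hy => ((h2 y hy) ▸ rfl))
      have hr0 : rest.count x = 0 := List.count_eq_zero.mpr hxrest
      have hxs : xs.count x = t.length := by
        rw [h1, List.count_append]; omega
      rw [List.count_cons_self, hxs, h3]
    have hofl : PySem.Set.ofList (x :: xs) = x :: PySem.Set.ofList rest := by
      rw [h1]; exact ofList_run x t rest h2 hxrest
    rw [runs, hofl, ihr, List.map_cons, hcount_x]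
    congr 1
    apply List.map_congr_left
    intro g hg
    have hgrest : g ∈ rest := (PySem.Set.mem_ofList rest g).mp hg
    have hgx : g ≠ x := fun hgx => hxrest (hgx ▸ hgrest)
    have : (x :: xs).count g = rest.count g := by
      have ht0 : t.count g = 0 := List.count_eq_zero.mpr (fun hgt => hgx (h2 g hgt))
      have hxs : xs.count g = rest.count g := by
        rw [h1, List.count_append]; omega
      rw [List.count_cons_of_ne (Ne.symm hgx), hxs]
    rw [this]

-- ofList keeps a subsequence of its argument
theorem ofList_sublist (l : List String) : (PySem.Set.ofList l).Sublist l := by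
  induction l with
  | nil => simp [PySem.Set.ofList_nil]
  | cons x xs ih =>
    rw [PySem.Set.ofList_cons]
    exact List.Sublist.cons₂ x (List.filter_sublist.trans ih)

-- deduplicating the sorted list = sorting the deduplicated list
theorem ofList_sorted_eq (gems : List String) :
    PySem.Set.ofList (PySem.List.sorted gems (fun x => x) false)
      = PySem.List.sorted (PySem.Set.ofList gems) (fun x => x) false := by
  symm
  apply PySem.List.sorted_eq_of_perm_of_pairwise_lt
  · apply (List.perm_ext_iff_of_nodup (PySem.Set.nodup_ofList _) (PySem.Set.nodup_ofList _)).mpr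
    intro a
    simp [PySem.Set.mem_ofList, PySem.List.mem_sorted]
  · have hpw : (PySem.Set.ofList (PySem.List.sorted gems (fun x => x) false)).Pairwise (· ≤ ·) := by
      exact (PySem.List.sorted_pairwise gems (fun x => x)).sublist
        (ofList_sublist (PySem.List.sorted gems (fun x => x) false))
    have hnd := PySem.Set.nodup_ofList (PySem.List.sorted gems (fun x => x) false)
    exact (hpw.and hnd).imp (fun h => lt_of_le_of_ne h.1 h.2)

-- ===== VERDICT (by name: the statement is the Claim_ definition above) =====
theorem summarize_gems_spec : Claim_equal_summarize_gems := by
  intro gems _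
  show summarize_gems gems = summarize_gems_alt gems
  simp only [summarize_gems, summarize_gems_alt,
    PySem.Dict.foldl_insert_getD_add_one_eq_counter, PySem.List.foldl_append_singleton_eq_map,
    PySem.Dict.keys_counter, List.nil_append,
    runs_sorted _ (PySem.List.sorted_pairwise gems (fun x => x)), ofList_sorted_eq]
  congr 1
  apply List.map_congr_left
  intro g _
  rw [PySem.Dict.getD_counter,
    (PySem.List.sorted_perm gems (fun x => x) false).count_eq g]
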